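-- pv_equiv track=rewrite | github.com/sushantsrivastav/crackingcodeInterview | multiply.py | product_helper
-- ===== SOURCE A (Python) =====
-- def product_helper(smaller,bigger):
--     if smaller == 0:
--         return 0
--     if smaller == 1:
--         return bigger
--     s = smaller >> 1
--     half = product_helper(s,bigger)
--     if (smaller %2 == 0):
--         return half + half
--     else :
--         return half + half + bigger
-- ===== SOURCE B (Python) =====
-- def product_helper(smaller, bigger):
--     # Sum a shifted copy of bigger for every set bit of smaller.
--     total = 0
--     for i in range(smaller.bit_length()):
--         if (smaller >> i) & 1:
--             total += bigger << i
--     return total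
-- ===== Notes on version B (the rewrite author's own statement) =====
-- stated objective: alternative
-- what changed: Replaced top-down recursive halving with a single loop over the bit positions of smaller (bit_length), summing a shifted copy of bigger for each set bit; no recursion and neither argument is halved/doubled in place. Pre_ excludes negative smaller, where A raises RecursionError.
import Mathlib
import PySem

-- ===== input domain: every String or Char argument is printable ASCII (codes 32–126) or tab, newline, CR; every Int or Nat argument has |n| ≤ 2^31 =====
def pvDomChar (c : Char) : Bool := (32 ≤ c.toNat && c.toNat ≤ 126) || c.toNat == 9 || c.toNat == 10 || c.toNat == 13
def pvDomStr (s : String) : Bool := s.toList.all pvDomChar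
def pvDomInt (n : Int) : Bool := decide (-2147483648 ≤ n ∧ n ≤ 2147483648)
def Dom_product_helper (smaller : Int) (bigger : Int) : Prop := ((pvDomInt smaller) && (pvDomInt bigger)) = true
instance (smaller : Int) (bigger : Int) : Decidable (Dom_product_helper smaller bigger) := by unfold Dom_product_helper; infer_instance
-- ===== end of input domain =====

-- B replaces A's top-down recursive halving with one loop over smaller's bit positions, summing shifted copies of bigger (same cost, different decomposition).


-- ===== PORT A =====
-- A's recursion on `smaller` (on Pre_, smaller ≥ 0), carried on its Nat value so Lean sees
-- termination; step for step: base cases 0 and 1, then s = smaller >> 1, half, parity branch.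
def productHelperGo (n : Nat) (bigger : Int) : Int :=
  if n = 0 then 0
  else if n = 1 then bigger
  else
    let s := n >>> 1
    let half := productHelperGo s bigger
    if n % 2 = 0 then half + half else half + half + bigger
decreasing_by simp [Nat.shiftRight_succ]; omega

def product_helper (smaller : Int) (bigger : Int) : Int :=
  productHelperGo smaller.toNat bigger

-- ===== PORT B =====
-- B's for-loop: total = 0; for i in range(smaller.bit_length()): if (smaller >> i) & 1: total += bigger << i.
def product_helper_alt (smaller : Int) (bigger : Int) : Int :=
  (PySem.List.pyRange 0 (PySem.Int.bitLength smaller : Int) 1).foldl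
    (fun total i =>
      if PySem.Int.band (smaller >>> i.toNat) 1 ≠ 0 then total + (bigger <<< i.toNat) else total)
    0

-- ===== PRECONDITION & SPEC =====
-- Pre_ excludes negative smaller: there A recurses forever (RecursionError in Python).
def Pre_product_helper (smaller : Int) (bigger : Int) : Prop := 0 ≤ smaller
instance (smaller : Int) (bigger : Int) : Decidable (Pre_product_helper smaller bigger) := by unfold Pre_product_helper; infer_instance
def pvWitness_product_helper : Int × Int := (3, 5)

def Spec_product_helper (smaller : Int) (bigger : Int) (out : Int) : Prop := out = product_helper_alt smaller bigger
instance (smaller : Int) (bigger : Int) (out : Int) : Decidable (Spec_product_helper smaller bigger out) := by unfold Spec_product_helper; infer_instance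

-- ===== CLAIM =====
def Claim_equal_product_helper : Prop := ∀ (smaller : Int) (bigger : Int), Dom_product_helper smaller bigger → Pre_product_helper smaller bigger → Spec_product_helper smaller bigger (product_helper smaller bigger)

-- ===== LEMMAS AND PROOFS =====
theorem productHelperGo_eq (n : Nat) (b : Int) : productHelperGo n b = (n : Int) * b := by
  induction n using Nat.strong_induction_on with
  | _ n ih =>
    rw [productHelperGo]
    split
    · simp [*]
    · split
      · simp [*]
      · have h2 : n >>> 1 = n / 2 := Nat.shiftRight_one n
        simp only [h2, ih (n / 2) (by omega)]
        have hn : n = 2 * (n / 2) + n % 2 := (Nat.div_add_mod' n 2).symm ▸ by omega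
        split
        · have : (n : Int) = 2 * ((n / 2 : Nat) : Int) := by push_cast; omega
          rw [this]; ring
        · have hm : n % 2 = 1 := Nat.mod_two_eq_zero_or_one n |>.resolve_left (by assumption)
          have : (n : Int) = 2 * ((n / 2 : Nat) : Int) + 1 := by push_cast; omega
          rw [this]; ring

-- B's loop up to bit position m accumulates (n mod 2^m) * b onto total.
theorem productAltFold_eq (n : Nat) (b : Int) (m : Nat) (total : Int) :
    (List.range m).foldl
      (fun (total : Int) (k : Nat) =>
        if PySem.Int.band ((n : Int) >>> ((((0 : Int) + (k : Int)).toNat : Nat) : Int)) 1 ≠ 0 then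
          total + (b <<< ((((0 : Int) + (k : Int)).toNat : Nat) : Int)) else total)
      total = total + ((n % 2 ^ m : Nat) : Int) * b := by
  induction m generalizing total with
  | zero => simp
  | succ m ih =>
    rw [List.range_succ, List.foldl_append, ih]
    have hk : (((0 : Int) + (m : Int)).toNat : Nat) = m := by omega
    have hsr : ((n : Int) >>> ((m : Nat) : Int)) = ((n >>> m : Nat) : Int) := by
      rw [Int.shiftRight_natCast_right]; exact Int.mem_toNat?.mp rfl
    have hsl : b <<< ((m : Nat) : Int) = b * 2 ^ m := by
      rw [Int.shiftLeft_natCast_right, Int.shiftLeft_eq]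
    have hband : PySem.Int.band ((n >>> m : Nat) : Int) 1 = ((n >>> m) &&& 1 : Nat) := by
      exact_mod_cast PySem.Int.band_natCast (n >>> m) 1
    have hbit : (n >>> m) &&& 1 = n / 2 ^ m % 2 := by
      rw [Nat.and_one_is_mod, Nat.shiftRight_eq_div_pow]
    have hmod : n % 2 ^ (m + 1) = n % 2 ^ m + 2 ^ m * (n / 2 ^ m % 2) := by
      rw [pow_succ, Nat.mod_mul]
    simp only [List.foldl_cons, List.foldl_nil, hk, hsr, hsl, hband, hbit, hmod]
    by_cases hz : n / 2 ^ m % 2 = 0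
    · simp [hz]
    · have h1 : n / 2 ^ m % 2 = 1 := by omega
      simp only [h1]
      push_cast
      simp
      ring

theorem product_helper_alt_eq (n : Nat) (b : Int) : product_helper_alt (n : Int) b = (n : Int) * b := by
  unfold product_helper_alt
  rw [PySem.List.pyRange_one, List.foldl_map]
  have hL : (((PySem.Int.bitLength (n : Int) : Int)) - 0).toNat = PySem.Int.bitLength (n : Int) := by omega
  rw [hL, productAltFold_eq]
  have hlt : n < 2 ^ PySem.Int.bitLength (n : Int) := by
    have := PySem.Int.lt_two_pow_bitLength (n : Int)
    simpa using this
  rw [Nat.mod_eq_of_lt hlt]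
  ring

-- ===== VERDICT =====
theorem product_helper_spec : Claim_equal_product_helper := by
  intro smaller bigger _ hpre
  unfold Spec_product_helper product_helper
  unfold Pre_product_helper at hpre
  obtain ⟨n, rfl⟩ : ∃ n : Nat, smaller = (n : Int) := ⟨smaller.toNat, by omega⟩
  rw [product_helper_alt_eq, Int.toNat_natCast, productHelperGo_eq]
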